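-- pv_equiv track=rewrite | github.com/kingkillery/context-1-data-gen | agentic_search_data_gen/domains/sec/verify.py | get_task_to_verify
-- ===== SOURCE A (Python) =====
-- from typing import Any, Dict, List, Tuple
--
-- def get_task_to_verify(tasks: List[Dict]) -> Tuple[Dict | None, Dict | None]:
--     """Find the latest task that needs verification.
--
--     Returns:
--         Tuple of (task_to_verify, prev_task) where prev_task is None for level 0 tasks.
--     """
--     if not tasks:
--         return None, None
--
--     # Sort by level
--     sorted_tasks = sorted(tasks, key=lambda t: t.get("level", 0))
--
--     # Find the latest task without passed_verification
--     for task in reversed(sorted_tasks):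
--         if "passed_verification" not in task:
--             level = task.get("level", 0)
--             prev_task = None
--             if level > 0:
--                 # Find the previous level's task
--                 for t in sorted_tasks:
--                     if t.get("level", 0) == level - 1:
--                         prev_task = t
--                         break
--             return task, prev_task
--
--     return None, None
-- ===== SOURCE B (Python) =====
-- def get_task_to_verify(tasks):
--     """Find the latest task that needs verification.
--
--     One linear pass keeps the unverified task with the highest level
--     (ties: the later one in original order); a second pass finds the
--     first task of the previous level.  No sorting needed.
--     """
--     best = None
--     for task in tasks:
--         if "passed_verification" not in task:
--             if best is None or task.get("level", 0) >= best.get("level", 0):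
--                 best = task
--     if best is None:
--         return None, None
--     level = best.get("level", 0)
--     prev_task = None
--     if level > 0:
--         for t in tasks:
--             if t.get("level", 0) == level - 1:
--                 prev_task = t
--                 break
--     return best, prev_task
-- ===== Notes on version B (the rewrite author's own statement) =====
-- stated objective: alternative
-- what changed: B drops the sort entirely: one linear best-keeping pass over the original list picks the unverified task with the highest level (later tasks win ties), then one scan of the original list finds the first task of the previous level, matching A's stable-sort tie-breaks.
import Mathlib
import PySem

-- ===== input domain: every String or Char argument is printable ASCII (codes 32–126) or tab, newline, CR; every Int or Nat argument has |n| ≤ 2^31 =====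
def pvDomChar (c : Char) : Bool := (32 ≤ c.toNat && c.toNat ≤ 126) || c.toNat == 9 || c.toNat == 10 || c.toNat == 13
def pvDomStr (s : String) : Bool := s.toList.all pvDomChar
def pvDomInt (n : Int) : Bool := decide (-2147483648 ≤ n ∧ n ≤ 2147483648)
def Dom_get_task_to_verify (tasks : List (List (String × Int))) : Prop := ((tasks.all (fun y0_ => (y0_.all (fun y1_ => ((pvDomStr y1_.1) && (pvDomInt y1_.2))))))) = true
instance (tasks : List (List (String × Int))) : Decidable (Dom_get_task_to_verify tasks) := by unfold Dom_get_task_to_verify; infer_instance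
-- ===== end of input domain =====

-- B replaces A's sort-then-two-scans over the sorted list by a single linear best-keeping
-- pass over the original list (plus one scan for the predecessor); objective: alternative (no sort).

-- ===== PORT A =====
-- t.get("level", 0) on a dict (association list, first match)
def pvLvl (t : List (String × Int)) : Int :=
  ((t.find? (fun p => p.1 == "level")).map Prod.snd).getD 0

-- '"passed_verification" not in t'
def pvUnv (t : List (String × Int)) : Bool :=
  (t.find? (fun p => p.1 == "passed_verification")).isNone

-- literal port of A: sort by level, scan the reversed sorted list for the first
-- unverified task (for-loop with early return = find?), then scan the sorted list
-- for the first task of the previous level.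
def get_task_to_verify (tasks : List (List (String × Int))) :
    (Option (List (String × Int))) × (Option (List (String × Int))) :=
  if tasks.isEmpty then (none, none)
  else
    let sorted_tasks := PySem.List.sorted tasks pvLvl
    match sorted_tasks.reverse.find? (fun task => pvUnv task) with
    | some task =>
        let level := pvLvl task
        let prev_task : Option (List (String × Int)) :=
          if level > 0 then sorted_tasks.find? (fun t => pvLvl t == level - 1) else none
        (some task, prev_task)
    | none => (none, none)

-- ===== PORT B =====
-- one fold step of Source B's first loop: keep the unverified task with the highest
-- level, later tasks win ties
def pvStep (best : Option (List (String × Int))) (task : List (String × Int)) :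
    Option (List (String × Int)) :=
  if pvUnv task then
    match best with
    | none => some task
    | some b => if pvLvl b ≤ pvLvl task then some task else some b
  else best

def pvBest (tasks : List (List (String × Int))) : Option (List (String × Int)) :=
  tasks.foldl pvStep none

-- literal port of Source B: no sort; linear pass, then one scan of the ORIGINAL list
def get_task_to_verify_alt (tasks : List (List (String × Int))) :
    (Option (List (String × Int))) × (Option (List (String × Int))) :=
  match pvBest tasks with
  | none => (none, none)
  | some best =>
      let level := pvLvl best
      let prev_task : Option (List (String × Int)) :=
        if level > 0 then tasks.find? (fun t => pvLvl t == level - 1) else none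
      (some best, prev_task)

-- ===== PRECONDITION & SPEC =====
def Spec_get_task_to_verify (tasks : List (List (String × Int))) (out : (Option (List (String × Int))) × (Option (List (String × Int)))) : Prop := out = get_task_to_verify_alt tasks
instance (tasks : List (List (String × Int))) (out : (Option (List (String × Int))) × (Option (List (String × Int)))) : Decidable (Spec_get_task_to_verify tasks out) := by unfold Spec_get_task_to_verify; infer_instance

-- ===== CLAIM (what is proved, stated in full; the proofs are below) =====
def Claim_equal_get_task_to_verify : Prop := ∀ (tasks : List (List (String × Int))), Dom_get_task_to_verify tasks → Spec_get_task_to_verify tasks (get_task_to_verify tasks)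

-- ===== LEMMAS AND PROOFS =====

-- inserting x into a level-sorted list does not change which task of a given
-- level comes first, except to append x's level behind the existing ones
theorem pv_find_insertBy (c : Int) (x : List (String × Int)) (s : List (List (String × Int)))
    (hs : s.Pairwise (fun a b => pvLvl a ≤ pvLvl b)) :
    (PySem.List.insertBy (fun a b => decide (pvLvl a < pvLvl b)) x s).find? (fun t => pvLvl t == c)
      = ((s.find? (fun t => pvLvl t == c)).or (if pvLvl x == c then some x else none)) := by
  induction s with
  | nil => cases h : (pvLvl x == c) <;> simp [PySem.List.insertBy, List.find?, h]
  | cons y ys ih =>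
    rcases List.pairwise_cons.mp hs with ⟨hy, hys⟩
    by_cases hlt : pvLvl x < pvLvl y
    · simp only [PySem.List.insertBy, decide_eq_true hlt, if_true]
      cases hxc : (pvLvl x == c) with
      | true =>
        have hxc' : pvLvl x = c := by simpa using hxc
        have hnone : (y :: ys).find? (fun t => pvLvl t == c) = none := by
          rw [List.find?_eq_none]
          intro t ht
          have h1 : pvLvl y ≤ pvLvl t := by
            rcases List.mem_cons.mp ht with h | h
            · subst h; exact le_refl _
            · exact hy t h
          simp only [beq_iff_eq]; omega
        rw [List.find?_cons_of_pos (p := fun t => pvLvl t == c) hxc, hnone]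
        simp
      | false =>
        rw [List.find?_cons_of_neg (p := fun t => pvLvl t == c) (by simp [hxc])]
        simp
    · simp only [PySem.List.insertBy, decide_eq_false hlt, Bool.false_eq_true, if_false]
      cases hyc : (pvLvl y == c) with
      | true => rw [List.find?_cons_of_pos (p := fun t => pvLvl t == c) hyc, List.find?_cons_of_pos (p := fun t => pvLvl t == c) hyc]; simp
      | false =>
        rw [List.find?_cons_of_neg (p := fun t => pvLvl t == c) (by simp [hyc]), List.find?_cons_of_neg (p := fun t => pvLvl t == c) (by simp [hyc]),
          ih hys]

-- scanning the reversed sorted list after inserting x = one more pvStep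
theorem pv_findrev_insertBy (x : List (String × Int)) (s : List (List (String × Int)))
    (hs : s.Pairwise (fun a b => pvLvl a ≤ pvLvl b)) :
    (PySem.List.insertBy (fun a b => decide (pvLvl a < pvLvl b)) x s).reverse.find?
        (fun task => pvUnv task)
      = pvStep (s.reverse.find? (fun task => pvUnv task)) x := by
  induction s with
  | nil =>
    cases h : pvUnv x <;>
      simp [PySem.List.insertBy, List.find?, pvStep, h]
  | cons y ys ih =>
    rcases List.pairwise_cons.mp hs with ⟨hy, hys⟩
    by_cases hlt : pvLvl x < pvLvl y
    · simp only [PySem.List.insertBy, decide_eq_true hlt, if_true]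
      rw [show (x :: y :: ys).reverse = (y :: ys).reverse ++ [x] by simp,
        List.find?_append]
      cases hr : (y :: ys).reverse.find? (fun task => pvUnv task) with
      | none =>
        cases h : pvUnv x <;> simp [pvStep, List.find?, h]
      | some b =>
        have hb : b ∈ y :: ys := List.mem_reverse.mp (List.mem_of_find?_eq_some hr)
        have hbl : pvLvl y ≤ pvLvl b := by
          rcases List.mem_cons.mp hb with h | h
          · subst h; exact le_refl _
          · exact hy b h
        have hnle : ¬ pvLvl b ≤ pvLvl x := by omega
        cases h : pvUnv x <;> simp [pvStep, h, hnle]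
    · simp only [PySem.List.insertBy, decide_eq_false hlt, Bool.false_eq_true, if_false]
      have hyx : pvLvl y ≤ pvLvl x := by omega
      rw [List.reverse_cons, List.find?_append, ih hys,
        show (y :: ys).reverse = ys.reverse ++ [y] by simp, List.find?_append]
      cases hu : pvUnv x with
      | false => simp [pvStep, hu]
      | true =>
        cases hr : ys.reverse.find? (fun task => pvUnv task) with
        | none =>
          simp only [pvStep, hu, if_true, Option.none_or]
          cases h : pvUnv y <;> simp [List.find?, h, hyx]
        | some b =>
          simp only [pvStep, hu, if_true, Option.some_or]
          by_cases hb : pvLvl b ≤ pvLvl x <;> simp [hb]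

-- the sorted-based scans of A computed over the original list: main invariant
theorem pv_sorted_invariant (tasks : List (List (String × Int))) :
    ((PySem.List.sorted tasks pvLvl).reverse.find? (fun task => pvUnv task) = pvBest tasks)
    ∧ (∀ c : Int, (PySem.List.sorted tasks pvLvl).find? (fun t => pvLvl t == c)
          = (tasks.find? (fun t => pvLvl t == c))) := by
  induction tasks using List.reverseRecOn with
  | nil => exact ⟨rfl, fun c => rfl⟩
  | append_singleton xs x ih =>
    have hsort : PySem.List.sorted (xs ++ [x]) pvLvl
        = PySem.List.insertBy (fun a b => decide (pvLvl a < pvLvl b)) x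
            (PySem.List.sorted xs pvLvl) := by
      rw [PySem.List.sorted_eq_foldl_insertBy, List.foldl_append,
        ← PySem.List.sorted_eq_foldl_insertBy]
      rfl
    have hpw : (PySem.List.sorted xs pvLvl).Pairwise (fun a b => pvLvl a ≤ pvLvl b) :=
      PySem.List.sorted_pairwise xs pvLvl
    constructor
    · rw [hsort, pv_findrev_insertBy x _ hpw, ih.1]
      simp [pvBest, List.foldl_append]
    · intro c
      rw [hsort, pv_find_insertBy c x _ hpw, ih.2 c, List.find?_append]
      cases h : (pvLvl x == c) <;> simp [List.find?, h]

-- ===== VERDICT (by name: the statement is the Claim_ definition above) =====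
theorem get_task_to_verify_spec : Claim_equal_get_task_to_verify := by
  intro tasks _
  unfold Spec_get_task_to_verify
  rcases tasks with _ | ⟨t, ts⟩
  · rfl
  · simp only [get_task_to_verify, get_task_to_verify_alt, List.isEmpty_cons, if_false,
      Bool.false_eq_true]
    rw [(pv_sorted_invariant (t :: ts)).1]
    cases h : pvBest (t :: ts) with
    | none => rfl
    | some best =>
      simp only [(pv_sorted_invariant (t :: ts)).2]
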